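-- pv_equiv track=rewrite | github.com/robbiechia/curriculum-workforce-alignment | src/module_readiness/api/dashboard_query_backend.py | _join_unique
-- ===== SOURCE A (Python) =====
-- from typing import Iterable, Sequence
--
-- def _join_unique(values: Sequence[object], limit: int = 3, sep: str = "; ") -> str:
--     out: list[str] = []
--     seen: set[str] = set()
--     for value in values:
--         item = str(value).strip()
--         if not item or item in seen:
--             continue
--         seen.add(item)
--         out.append(item)
--         if len(out) >= limit:
--             break
--     return sep.join(out)
-- ===== SOURCE B (Python) =====
-- def _join_unique(values, limit=3, sep="; "):
--     # nub by filtering: repeatedly take the head of a pre-stripped worklist and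
--     # filter its duplicates out of the remainder; no seen-set, no parts list.
--     items = [s for v in values if (s := str(v).strip())]
--     out = ""
--     taken = 0
--     while items:
--         s = items[0]
--         out = s if not out else out + sep + s
--         taken += 1
--         if taken >= limit:
--             break
--         items = [w for w in items[1:] if w != s]
--     return out
-- ===== Notes on version B (the rewrite author's own statement) =====
-- stated objective: alternative
-- what changed: Replaces A's seen-set dedup inside a single scan by a nub-by-filtering worklist: pre-strip and drop empties once, then repeatedly take the worklist head, splice it onto the joined string, and filter that item's duplicates out of the remaining worklist; no seen-set, no output list, no final join.
import Mathlib
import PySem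

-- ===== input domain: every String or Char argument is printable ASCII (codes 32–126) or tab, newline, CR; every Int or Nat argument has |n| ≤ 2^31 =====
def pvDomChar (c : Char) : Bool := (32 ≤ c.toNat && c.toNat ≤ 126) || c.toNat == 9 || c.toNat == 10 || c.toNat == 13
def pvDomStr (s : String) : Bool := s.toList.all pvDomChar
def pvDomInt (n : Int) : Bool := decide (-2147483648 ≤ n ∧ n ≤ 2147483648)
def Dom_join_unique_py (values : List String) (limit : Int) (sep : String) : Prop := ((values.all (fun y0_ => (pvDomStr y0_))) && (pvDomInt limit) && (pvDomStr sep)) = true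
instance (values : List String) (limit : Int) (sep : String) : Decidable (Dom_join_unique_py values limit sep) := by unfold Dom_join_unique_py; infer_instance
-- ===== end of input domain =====

-- B replaces A's seen-set dedup by a nub-by-filtering worklist (take the head, filter its duplicates
-- out of the remainder, splice onto the joined string); alternative, same result on every input, total.


-- ===== PORT A =====
-- A's loop: accumulate stripped non-empty unseen items into `out`, break as soon as len(out) >= limit.
def joinUniqueLoop (limit : Int) (values : List String) (out : List String) (seen : PySem.Set String) : List String :=
  match values with
  | [] => out
  | v :: rest =>
    let item := PySem.Str.strip v
    if item = "" ∨ PySem.Set.contains seen item then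
      joinUniqueLoop limit rest out seen
    else
      let seen' := PySem.Set.add seen item
      let out' := out ++ [item]
      if limit ≤ (out'.length : Int) then out'
      else joinUniqueLoop limit rest out' seen'

def join_unique_py (values : List String) (limit : Int) (sep : String) : String :=
  PySem.Str.join sep (joinUniqueLoop limit values [] PySem.Set.empty)

-- ===== PORT B =====
-- B's worklist loop: pre-strip and drop empties, then repeatedly take the head, extend the
-- joined string, and filter the head's duplicates out of the remaining worklist.
def altLoop (sep : String) (limit : Int) (items : List String) (out : String) (taken : Int) : String :=
  match items with
  | [] => out
  | s :: rest =>
    let out' := if out = "" then s else out ++ sep ++ s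
    let taken' := taken + 1
    if limit ≤ taken' then out'
    else altLoop sep limit (rest.filter (fun w => w ≠ s)) out' taken'
termination_by items.length
decreasing_by
  simp only [List.length_cons, Nat.lt_succ_iff, List.length_unattach]
  exact le_trans (List.length_filter_le _ _) (by simp)

def join_unique_py_alt (values : List String) (limit : Int) (sep : String) : String :=
  altLoop sep limit ((values.map PySem.Str.strip).filter (fun s => s ≠ "")) "" 0

-- ===== PRECONDITION & SPEC =====
def Spec_join_unique_py (values : List String) (limit : Int) (sep : String) (out : String) : Prop := out = join_unique_py_alt values limit sep
instance (values : List String) (limit : Int) (sep : String) (out : String) : Decidable (Spec_join_unique_py values limit sep out) := by unfold Spec_join_unique_py; infer_instance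

-- ===== CLAIM (what is proved, stated in full; the proofs are below) =====
def Claim_equal_join_unique_py : Prop := ∀ (values : List String) (limit : Int) (sep : String), Dom_join_unique_py values limit sep → Spec_join_unique_py values limit sep (join_unique_py values limit sep)

-- ===== LEMMAS AND PROOFS =====

-- The list of items both programs select: first occurrences of non-empty stripped items whose
-- stripped form is not flagged by `av`, stopping with the element that brings the count to k
-- (one element is still taken when k ≤ 0, matching A's post-append length check).
def selJU (values : List String) (av : String → Bool) (k : Int) : List String :=
  match values with
  | [] => []
  | v :: rest =>
    let s := PySem.Str.strip v
    if s = "" ∨ av s then selJU rest av k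
    else if k ≤ 1 then [s]
    else s :: selJU rest (fun x => av x || x == s) (k - 1)

theorem selJU_congr (values : List String) (av av' : String → Bool) (k : Int)
    (h : ∀ x, av x = av' x) : selJU values av k = selJU values av' k := by
  induction values generalizing av av' k with
  | nil => rfl
  | cons v rest ih =>
    simp only [selJU, h]
    split_ifs with h1 h2
    · exact ih av av' k h
    · rfl
    · rfl

-- A's loop computes `out ++ selJU …` (no invariant tying out to seen is needed:
-- the skip test reads only seen, the break test only out.length).
theorem joinUniqueLoop_eq_selJU (values : List String) (limit : Int) (out : List String)
    (seen : PySem.Set String) :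
    joinUniqueLoop limit values out seen
      = out ++ selJU values (fun x => PySem.Set.contains seen x) (limit - out.length) := by
  induction values generalizing out seen with
  | nil => simp [joinUniqueLoop, selJU]
  | cons v rest ih =>
    simp only [joinUniqueLoop, selJU]
    split_ifs with h1 h2 h3 h3
    · exact ih out seen
    · rfl
    · exact absurd (by simp at h2 ⊢; omega : limit - (out.length : Int) ≤ 1) h3
    · exact absurd (by simp; omega : limit ≤ ((out ++ [PySem.Str.strip v]).length : Int)) h2
    · rw [ih]
      have hmem : PySem.Str.strip v ∉ seen := by
        rw [← PySem.Set.contains_iff]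
        simpa using (not_or.mp h1).2
      rw [PySem.Set.add_of_not_mem hmem, List.append_assoc, List.singleton_append]
      have hk : limit - (((out ++ [PySem.Str.strip v]).length : Nat) : Int)
          = limit - out.length - 1 := by
        simp only [List.length_append, List.length_cons, List.length_nil]
        push_cast
        ring
      rw [hk]
      exact congrArg _ (congrArg _ (selJU_congr _ _ _ _
        (fun x => by by_cases hxy : x = PySem.Str.strip v <;> simp [PySem.Set.contains, hxy])))

-- Filtering the s-duplicates out of the tail is the same as flagging s in `av`.
theorem selJU_filter (values : List String) (av : String → Bool) (k : Int) (s : String) :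
    selJU (values.filter (fun w => PySem.Str.strip w ≠ s)) av k
      = selJU values (fun x => av x || x == s) k := by
  induction values generalizing av k with
  | nil => rfl
  | cons v rest ih =>
    by_cases heq : PySem.Str.strip v = s
    · have hfc : (decide (PySem.Str.strip v ≠ s)) = false := by simp [heq]
      rw [List.filter_cons, hfc, if_neg (by simp)]
      have hrs : selJU (v :: rest) (fun x => av x || x == s) k
          = selJU rest (fun x => av x || x == s) k := by
        simp only [selJU]
        have hor : (av (PySem.Str.strip v) || (PySem.Str.strip v == s)) = true := by
          simp [heq]
        rw [if_pos (Or.inr hor)]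
      rw [hrs]
      exact ih av k
    · have hfc : (decide (PySem.Str.strip v ≠ s)) = true := by simp [heq]
      rw [List.filter_cons, hfc, if_pos rfl]
      simp only [selJU]
      have hxs : ((PySem.Str.strip v) == s) = false := by simp [heq]
      by_cases hskip : PySem.Str.strip v = "" ∨ av (PySem.Str.strip v) = true
      · have hskip' : PySem.Str.strip v = ""
            ∨ (av (PySem.Str.strip v) || (PySem.Str.strip v == s)) = true := by
          rcases hskip with h | h
          · exact Or.inl h
          · exact Or.inr (by simp [h])
        rw [if_pos hskip, if_pos hskip']
        exact ih av k
      · have hskip' : ¬(PySem.Str.strip v = ""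
            ∨ (av (PySem.Str.strip v) || (PySem.Str.strip v == s)) = true) := by
          rcases not_or.mp hskip with ⟨ha, hb⟩
          simp only [not_or]
          exact ⟨ha, by simp only [hxs, Bool.or_false]; exact hb⟩
        rw [if_neg hskip, if_neg hskip']
        by_cases hk : k ≤ 1
        · rw [if_pos hk, if_pos hk]
        · rw [if_neg hk, if_neg hk]
          congr 1
          rw [ih _ (k - 1)]
          exact selJU_congr _ _ _ _ (fun x => by
            cases av x <;> cases hx : (x == s) <;> cases hy : (x == PySem.Str.strip v) <;>
              simp)

-- join lemmas lifted from PySem.Chars.join_singleton / join_cons_cons to String.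
theorem strJoin_singleton (sep x : String) : PySem.Str.join sep [x] = x := by
  simp only [PySem.Str.join, List.map_cons, List.map_nil, PySem.Chars.join_singleton,
    String.ofList_toList]

theorem strJoin_cons_ne (sep s b : String) (L : List String) :
    PySem.Str.join sep (s :: b :: L) = s ++ sep ++ PySem.Str.join sep (b :: L) := by
  simp only [PySem.Str.join, List.map_cons, PySem.Chars.join_cons_cons]
  rw [String.ofList_append, String.ofList_append, String.ofList_toList, String.ofList_toList]

theorem strJoin_head_merge (sep out s : String) (X : List String) :
    PySem.Str.join sep ((out ++ sep ++ s) :: X) = out ++ sep ++ PySem.Str.join sep (s :: X) := by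
  cases X with
  | nil => rw [strJoin_singleton, strJoin_singleton]
  | cons x xs =>
    rw [strJoin_cons_ne, strJoin_cons_ne]
    simp [String.append_assoc]

theorem str_append_ne_empty (a b : String) (ha : a ≠ "") : a ++ b ≠ "" := by
  intro h
  apply ha
  have h2 := congrArg String.toList h
  rw [String.toList_append] at h2
  have h3 : a.toList = [] := (List.append_eq_nil_iff.mp h2).1
  have := congrArg String.ofList h3
  rwa [String.ofList_toList] at this

-- The items B selects from its pre-stripped worklist (k ≤ 1 still takes one, as in B's
-- post-increment check).
def selB (items : List String) (k : Int) : List String :=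
  match items with
  | [] => []
  | s :: rest =>
    if k ≤ 1 then [s]
    else s :: selB (rest.filter (fun w => w ≠ s)) (k - 1)
termination_by items.length
decreasing_by
  simp only [List.length_cons, Nat.lt_succ_iff, List.length_unattach]
  exact le_trans (List.length_filter_le _ _) (by simp)

-- Filtering the worklist commutes with building it by map-strip + drop-empties.
theorem items_filter_comm (rest : List String) (s : String) :
    ((rest.map PySem.Str.strip).filter (fun t => t ≠ "")).filter (fun w => w ≠ s)
      = ((rest.filter (fun w => PySem.Str.strip w ≠ s)).map PySem.Str.strip).filter
          (fun t => t ≠ "") := by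
  rw [List.filter_map, List.filter_map, List.filter_map, List.filter_filter, List.filter_filter]
  exact congrArg _ (List.filter_congr (fun w _ => by
    cases hx : decide (PySem.Str.strip w = "") <;> cases hy : decide (PySem.Str.strip w = s) <;>
      simp [Function.comp, hx, hy]))

-- B's worklist selection equals A's flag-based selection.
theorem selB_eq_selJU (values : List String) (k : Int) :
    selB ((values.map PySem.Str.strip).filter (fun s => s ≠ "")) k
      = selJU values (fun _ => false) k := by
  induction hn : values.length using Nat.strong_induction_on generalizing values k with
  | _ n ih =>
  cases values with
  | nil => simp [List.map_nil, List.filter_nil, selB, selJU]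
  | cons v rest =>
    simp only [List.map_cons, List.filter_cons]
    by_cases h0 : PySem.Str.strip v = ""
    · rw [show (decide (PySem.Str.strip v ≠ "")) = false by simp [h0], if_neg (by simp)]
      have hsel : selJU (v :: rest) (fun _ => false) k = selJU rest (fun _ => false) k := by
        simp only [selJU]
        rw [if_pos (Or.inl h0)]
      rw [hsel]
      exact ih rest.length (by simp [← hn]) rest k rfl
    · rw [show (decide (PySem.Str.strip v ≠ "")) = true by simp [h0], if_pos rfl]
      rw [selB]
      simp only [selJU]
      have hskip : ¬(PySem.Str.strip v = "" ∨ (false : Bool) = true) := by simp [h0]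
      rw [if_neg hskip]
      by_cases hk : k ≤ 1
      · rw [if_pos hk, if_pos hk]
      · rw [if_neg hk, if_neg hk]
        congr 1
        rw [items_filter_comm rest (PySem.Str.strip v),
          ih (rest.filter (fun w => PySem.Str.strip w ≠ PySem.Str.strip v)).length
            (Nat.lt_of_le_of_lt (List.length_filter_le _ _) (by simp [← hn])) _ (k - 1) rfl,
          selJU_filter rest (fun _ => false) (k - 1) (PySem.Str.strip v)]

-- B's loop with a non-empty joined prefix `out` appends sep-joined selected items to it.
theorem altLoop_out (sep : String) (limit : Int) (items : List String)
    (hne : ∀ x ∈ items, x ≠ "") (out : String) (taken : Int) (hout : out ≠ "") :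
    altLoop sep limit items out taken
      = PySem.Str.join sep (out :: selB items (limit - taken)) := by
  induction hn : items.length using Nat.strong_induction_on generalizing items out taken with
  | _ n ih =>
  cases items with
  | nil => rw [altLoop, selB, strJoin_singleton]
  | cons s rest =>
    rw [altLoop, selB]
    rw [if_neg hout]
    by_cases hc : limit ≤ taken + 1
    · rw [if_pos hc, if_pos (by omega : limit - taken ≤ 1), strJoin_cons_ne, strJoin_singleton]
    · rw [if_neg hc, if_neg (by omega : ¬limit - taken ≤ 1)]
      have hs : s ≠ "" := hne s (List.mem_cons_self ..)
      rw [ih (rest.filter (fun w => w ≠ s)).length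
          (Nat.lt_of_le_of_lt (List.length_filter_le _ _) (by simp [← hn]))
          (rest.filter (fun w => w ≠ s))
          (fun x hx => hne x (List.mem_cons_of_mem _ (List.mem_of_mem_filter hx)))
          (out ++ sep ++ s) (taken + 1) (str_append_ne_empty _ _ (str_append_ne_empty _ _ hout))
          rfl,
        strJoin_head_merge]
      have hk : limit - (taken + 1) = limit - taken - 1 := by ring
      rw [hk, ← strJoin_cons_ne]

-- Starting B's loop with the empty string gives the join of the selected items.
theorem altLoop_start (sep : String) (limit : Int) (items : List String)
    (hne : ∀ x ∈ items, x ≠ "") (taken : Int) :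
    altLoop sep limit items "" taken = PySem.Str.join sep (selB items (limit - taken)) := by
  cases items with
  | nil => rw [altLoop, selB]; rfl
  | cons s rest =>
    rw [altLoop, selB]
    rw [if_pos rfl]
    by_cases hc : limit ≤ taken + 1
    · rw [if_pos hc, if_pos (by omega : limit - taken ≤ 1), strJoin_singleton]
    · rw [if_neg hc, if_neg (by omega : ¬limit - taken ≤ 1)]
      have hs : s ≠ "" := hne s (List.mem_cons_self ..)
      rw [altLoop_out sep limit (rest.filter (fun w => w ≠ s))
          (fun x hx => hne x (List.mem_cons_of_mem _ (List.mem_of_mem_filter hx)))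
          s (taken + 1) hs]
      have hk : limit - (taken + 1) = limit - taken - 1 := by ring
      rw [hk]

-- ===== VERDICT (by name: the statement is the Claim_ definition above) =====
theorem join_unique_py_spec : Claim_equal_join_unique_py := by
  intro values limit sep _
  unfold Spec_join_unique_py join_unique_py join_unique_py_alt
  rw [joinUniqueLoop_eq_selJU,
    altLoop_start sep limit _ (fun x hx => by simpa using (List.mem_filter.mp hx).2) 0]
  simp only [List.nil_append, List.length_nil, Nat.cast_zero, Int.sub_zero]
  rw [selB_eq_selJU]
  exact congrArg _ (selJU_congr _ _ _ _ (fun x => by simp [PySem.Set.empty, PySem.Set.contains]))
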